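-- pv_equiv track=rewrite | github.com/vineetbansal/cutqc2 | cutqc/evaluator.py | mutate_measurement_basis
-- ===== SOURCE A (Python) =====
-- import itertools
--
-- def mutate_measurement_basis(meas):
--     """
--     I and Z measurement basis correspond to the same logical circuit
--     """
--     if all(x != "I" for x in meas):
--         return [meas]
--     else:
--         mutated_meas = []
--         for x in meas:
--             if x != "I":
--                 mutated_meas.append([x])
--             else:
--                 mutated_meas.append(["I", "Z"])
--         mutated_meas = list(itertools.product(*mutated_meas))
--         return mutated_meas
-- ===== SOURCE B (Python) =====
-- def mutate_measurement_basis(meas):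
--     """
--     I and Z measurement basis correspond to the same logical circuit
--     """
--     if all(x != "I" for x in meas):
--         return [meas]
--     idx = [i for i, x in enumerate(meas) if x == "I"]
--     k = len(idx)
--     out = []
--     for n in range(2 ** k):
--         row = list(meas)
--         for j, i in enumerate(idx):
--             row[i] = "Z" if (n >> (k - 1 - j)) & 1 else "I"
--         out.append(tuple(row))
--     return out
-- ===== Notes on version B (the rewrite author's own statement) =====
-- stated objective: alternative
-- what changed: Replaces the per-position options list plus itertools.product with binary-counter enumeration: collect the I positions, then for each integer n in range(2**k) build the row directly by decoding n's bits (bit set -> Z) into those positions.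
import Mathlib
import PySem

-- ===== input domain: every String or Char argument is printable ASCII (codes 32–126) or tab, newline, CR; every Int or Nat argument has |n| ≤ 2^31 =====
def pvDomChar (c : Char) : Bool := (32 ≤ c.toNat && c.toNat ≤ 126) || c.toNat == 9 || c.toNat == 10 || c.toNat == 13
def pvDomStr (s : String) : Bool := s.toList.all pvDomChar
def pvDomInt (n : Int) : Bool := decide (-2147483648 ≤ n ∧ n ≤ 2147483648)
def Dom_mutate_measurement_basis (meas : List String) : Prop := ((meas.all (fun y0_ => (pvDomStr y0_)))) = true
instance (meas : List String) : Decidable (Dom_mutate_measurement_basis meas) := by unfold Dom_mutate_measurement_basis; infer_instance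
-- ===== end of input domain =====

-- B replaces the options-list build + itertools.product with binary-counter
-- enumeration over the I positions (genuinely different algorithm, same cost).


-- ===== PORT A =====
-- itertools.product(*lists): rightmost factor varies fastest
def pyProduct : List (List String) → List (List String)
  | [] => [[]]
  | l :: ls => l.flatMap (fun x => (pyProduct ls).map (fun t => x :: t))

def mutate_measurement_basis (meas : List String) : List (List String) :=
  if meas.all (fun x => x != "I") then [meas]
  else
    let mutated_meas := meas.foldl (fun acc x => acc ++ [if x != "I" then [x] else ["I", "Z"]]) []
    pyProduct mutated_meas

-- ===== PORT B =====
-- Python enumerate with Nat indices (exact here: enumerate always yields i ≥ 0)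
def natEnum {α : Type} : List α → Nat → List (Nat × α)
  | [], _ => []
  | x :: xs, s => (s, x) :: natEnum xs (s + 1)

def mutate_measurement_basis_alt (meas : List String) : List (List String) :=
  if meas.all (fun x => x != "I") then [meas]
  else
    -- idx = [i for i, x in enumerate(meas) if x == "I"]
    let idx := (natEnum meas 0).filterMap (fun p => if p.2 == "I" then some p.1 else none)
    let k := idx.length
    -- for n in range(2 ** k): all values ≥ 0, so Nat's List.range is exact;
    -- k ≥ 1 and j ≤ k-1 in this branch, so Nat subtraction k-1-j is exact too
    (List.range (2 ^ k)).foldl (fun out n =>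
      out ++ [(natEnum idx 0).foldl
        (fun row ji => row.set ji.2 (if (n >>> (k - 1 - ji.1)) &&& 1 != 0 then "Z" else "I")) meas]) []

-- ===== PRECONDITION & SPEC =====
def Spec_mutate_measurement_basis (meas : List String) (out : List (List String)) : Prop := out = mutate_measurement_basis_alt meas
instance (meas : List String) (out : List (List String)) : Decidable (Spec_mutate_measurement_basis meas out) := by unfold Spec_mutate_measurement_basis; infer_instance

-- ===== CLAIM (what is proved, stated in full; the proofs are below) =====
def Claim_equal_mutate_measurement_basis : Prop := ∀ (meas : List String), Dom_mutate_measurement_basis meas → Spec_mutate_measurement_basis meas (mutate_measurement_basis meas)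

-- ===== LEMMAS AND PROOFS =====

-- options assigned to one character by A's else branch
def optionsOf (x : String) : List String := if x == "I" then ["I", "Z"] else [x]

-- positions of "I" in the list
def Ipos : List String → List Nat
  | [] => []
  | x :: xs => if x = "I" then 0 :: (Ipos xs).map (· + 1) else (Ipos xs).map (· + 1)

-- B's inner loop body, named for the proofs
def stepFn (n k : Nat) : List String → (Nat × Nat) → List String :=
  fun row ji => row.set ji.2 (if (n >>> (k - 1 - ji.1)) &&& 1 != 0 then "Z" else "I")

-- recursive characterisation of one output row: the r-th remaining "I" reads bit r-1 of n
def rowRec : List String → Nat → Nat → List String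
  | [], _, _ => []
  | x :: xs, r, n =>
    if x = "I" then (if (n >>> (r - 1)) &&& 1 != 0 then "Z" else "I") :: rowRec xs (r - 1) n
    else x :: rowRec xs r n

lemma optionsOf_I : optionsOf "I" = ["I", "Z"] := rfl

lemma optionsOf_ne {x : String} (hx : x ≠ "I") : optionsOf x = [x] := by
  simp [optionsOf, hx]

lemma Ipos_I (xs : List String) : Ipos ("I" :: xs) = 0 :: (Ipos xs).map (· + 1) := by
  simp [Ipos]

lemma Ipos_ne {x : String} (hx : x ≠ "I") (xs : List String) :
    Ipos (x :: xs) = (Ipos xs).map (· + 1) := by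
  simp [Ipos, hx]

lemma rowRec_I (xs : List String) (r n : Nat) :
    rowRec ("I" :: xs) r n
      = (if (n >>> (r - 1)) &&& 1 != 0 then "Z" else "I") :: rowRec xs (r - 1) n := by
  simp [rowRec]

lemma rowRec_ne {x : String} (hx : x ≠ "I") (xs : List String) (r n : Nat) :
    rowRec (x :: xs) r n = x :: rowRec xs r n := by
  simp [rowRec, hx]

lemma count_I (xs : List String) : ("I" :: xs).count "I" = xs.count "I" + 1 := by
  simp

lemma count_ne {x : String} (hx : x ≠ "I") (xs : List String) :
    (x :: xs).count "I" = xs.count "I" := by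
  simp [hx]

lemma mutated_eq (meas : List String) :
    meas.foldl (fun acc x => acc ++ [if x != "I" then [x] else ["I", "Z"]]) []
      = meas.map optionsOf := by
  have h : ∀ (l : List String) (acc : List (List String)),
      l.foldl (fun acc x => acc ++ [if x != "I" then [x] else ["I", "Z"]]) acc
        = acc ++ l.map optionsOf := by
    intro l
    induction l with
    | nil => simp
    | cons x xs ih =>
      intro acc
      simp only [List.foldl_cons, ih, List.map_cons, List.append_assoc]
      congr 2
      by_cases hx : x = "I" <;> simp [hx, optionsOf]
  simpa using h meas []

lemma idx_eq (meas : List String) : ∀ s : Nat,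
    (natEnum meas s).filterMap (fun p => if p.2 == "I" then some p.1 else none)
      = (Ipos meas).map (· + s) := by
  induction meas with
  | nil => intro s; simp [natEnum, Ipos]
  | cons x xs ih =>
    intro s
    by_cases hx : x = "I"
    · subst hx
      simp only [natEnum, List.filterMap_cons, Ipos_I, List.map_cons, ih (s + 1),
        List.map_map, Function.comp_def]
      simp only [BEq.rfl, Nat.zero_add]
      refine congrArg (_ :: ·) (List.map_congr_left fun a _ => by omega)
    · have hb : (x == "I") = false := by simp [hx]
      simp only [natEnum, List.filterMap_cons, hb, Ipos_ne hx, ih (s + 1),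
        List.map_map, Function.comp_def]
      exact List.map_congr_left fun a _ => by omega

lemma Ipos_length (meas : List String) : (Ipos meas).length = meas.count "I" := by
  induction meas with
  | nil => simp [Ipos]
  | cons x xs ih =>
    by_cases hx : x = "I"
    · subst hx; simp [Ipos_I, ih]
    · simp [Ipos_ne hx, count_ne hx, ih]

lemma outer_foldl {α : Type} (l : List α) (f : α → List String)
    (acc : List (List String)) :
    l.foldl (fun out n => out ++ [f n]) acc = acc ++ l.map f := by
  induction l generalizing acc with
  | nil => simp
  | cons a l ih => simp [ih, List.append_assoc]

lemma natEnum_map {α β : Type} (g : α → β) (l : List α) (s : Nat) :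
    natEnum (l.map g) s = (natEnum l s).map (fun p => (p.1, g p.2)) := by
  induction l generalizing s with
  | nil => simp [natEnum]
  | cons a l ih => simp [natEnum, ih]

lemma natEnum_shift {α : Type} (l : List α) (s : Nat) :
    natEnum l (s + 1) = (natEnum l s).map (fun p => (p.1 + 1, p.2)) := by
  induction l generalizing s with
  | nil => simp [natEnum]
  | cons a l ih => simp [natEnum, ih]

lemma fold_shift_pos (n k : Nat) (ps : List (Nat × Nat)) :
    ∀ (row : List String) (y : String),
    (ps.map fun p => (p.1, p.2 + 1)).foldl (stepFn n k) (y :: row)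
      = y :: ps.foldl (stepFn n k) row := by
  induction ps with
  | nil => intro row y; simp
  | cons q ps ih =>
    intro row y
    simp only [List.map_cons, List.foldl_cons]
    have : stepFn n k (y :: row) (q.1, q.2 + 1) = y :: stepFn n k row q := by
      simp [stepFn]
    rw [this, ih]

lemma fold_shift_both (n k : Nat) (ps : List (Nat × Nat)) :
    ∀ (row : List String) (y : String),
    (ps.map fun p => (p.1 + 1, p.2 + 1)).foldl (stepFn n (k + 1)) (y :: row)
      = y :: ps.foldl (stepFn n k) row := by
  induction ps with
  | nil => intro row y; simp
  | cons q ps ih =>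
    intro row y
    simp only [List.map_cons, List.foldl_cons]
    have : stepFn n (k + 1) (y :: row) (q.1 + 1, q.2 + 1) = y :: stepFn n k row q := by
      simp only [stepFn, List.set_cons_succ]
      have : k + 1 - 1 - (q.1 + 1) = k - 1 - q.1 := by omega
      rw [this]
    rw [this, ih]

lemma inner_eq (meas : List String) (n : Nat) :
    (natEnum (Ipos meas) 0).foldl (stepFn n (Ipos meas).length) meas
      = rowRec meas (Ipos meas).length n := by
  induction meas with
  | nil => simp [Ipos, natEnum, rowRec]
  | cons x xs ih =>
    by_cases hx : x = "I"
    · subst hx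
      rw [Ipos_I, rowRec_I]
      simp only [natEnum, List.length_cons, List.length_map, List.foldl_cons]
      have h0 : stepFn n ((Ipos xs).length + 1) ("I" :: xs) (0, 0)
          = (if (n >>> ((Ipos xs).length + 1 - 1)) &&& 1 != 0 then "Z" else "I") :: xs := by
        simp [stepFn]
      rw [h0]
      have h1 : natEnum ((Ipos xs).map (· + 1)) (0 + 1)
          = (natEnum (Ipos xs) 0).map (fun p => (p.1 + 1, p.2 + 1)) := by
        rw [natEnum_shift, natEnum_map, List.map_map]
        rfl
      rw [h1, fold_shift_both, ih]
      simp
    · rw [Ipos_ne hx, rowRec_ne hx]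
      simp only [List.length_map]
      rw [natEnum_map, fold_shift_pos, ih]

lemma and_one_testBit (n c : Nat) : ((n >>> c) &&& 1 != 0) = n.testBit c := by
  simp [Nat.testBit, Nat.and_comm]

lemma rowRec_mod (xs : List String) :
    ∀ n m : Nat, n % 2 ^ (xs.count "I") = m % 2 ^ (xs.count "I") →
      rowRec xs (xs.count "I") n = rowRec xs (xs.count "I") m := by
  induction xs with
  | nil => intro n m _; simp [rowRec]
  | cons x xs ih =>
    intro n m h
    by_cases hx : x = "I"
    · subst hx
      rw [count_I] at h ⊢
      set c := xs.count "I" with hcdef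
      have hbit : n.testBit c = m.testBit c := by
        have hn : n.testBit c = (n % 2 ^ (c + 1)).testBit c := by
          rw [Nat.testBit_mod_two_pow]; simp
        have hm : m.testBit c = (m % 2 ^ (c + 1)).testBit c := by
          rw [Nat.testBit_mod_two_pow]; simp
        rw [hn, hm, h]
      have htail : n % 2 ^ c = m % 2 ^ c := by
        have hd : (2 : Nat) ^ c ∣ 2 ^ (c + 1) := pow_dvd_pow 2 (Nat.le_succ c)
        calc n % 2 ^ c = n % 2 ^ (c + 1) % 2 ^ c := (Nat.mod_mod_of_dvd n hd).symm
          _ = m % 2 ^ (c + 1) % 2 ^ c := by rw [h]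
          _ = m % 2 ^ c := Nat.mod_mod_of_dvd m hd
      rw [rowRec_I, rowRec_I]
      simp only [Nat.add_sub_cancel]
      rw [and_one_testBit, and_one_testBit, hbit, ih n m htail]
    · rw [count_ne hx] at h ⊢
      rw [rowRec_ne hx, rowRec_ne hx, ih n m h]

lemma product_eq (meas : List String) :
    pyProduct (meas.map optionsOf)
      = (List.range (2 ^ meas.count "I")).map (fun n => rowRec meas (meas.count "I") n) := by
  induction meas with
  | nil => simp [pyProduct, rowRec]
  | cons x xs ih =>
    by_cases hx : x = "I"
    · subst hx
      rw [count_I]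
      set c := xs.count "I" with hcdef
      have hsplit : (2 : Nat) ^ (c + 1) = 2 ^ c + 2 ^ c := by ring
      rw [hsplit, List.range_add]
      simp only [List.map_cons, optionsOf_I, pyProduct, List.flatMap_cons,
        List.flatMap_nil, List.append_nil, ih, List.map_append, List.map_map]
      congr 1
      · -- low half: bit c of n is 0, head is "I"
        apply List.map_congr_left
        intro n hn
        have hn' : n < 2 ^ c := List.mem_range.mp hn
        have hbit : (n >>> c) &&& 1 = 0 := by
          rw [Nat.shiftRight_eq_div_pow, Nat.div_eq_of_lt hn']
          rfl
        rw [Function.comp_apply, rowRec_I]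
        simp [hbit]
      · -- high half: bit c of 2^c + n is 1, head is "Z", tail as for n
        apply List.map_congr_left
        intro n hn
        have hn' : n < 2 ^ c := List.mem_range.mp hn
        have hdiv : (2 ^ c + n) >>> c = 1 := by
          rw [Nat.shiftRight_eq_div_pow, Nat.add_comm,
            Nat.add_div_right _ (Nat.two_pow_pos c), Nat.div_eq_of_lt hn']
        have htail : rowRec xs c (2 ^ c + n) = rowRec xs c n := by
          exact rowRec_mod xs _ _ (Nat.add_mod_left _ _)
        rw [Function.comp_apply, Function.comp_apply, rowRec_I]
        simp [hdiv, htail]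
    · rw [count_ne hx]
      simp only [List.map_cons, optionsOf_ne hx, pyProduct, List.flatMap_cons,
        List.flatMap_nil, List.append_nil, ih, List.map_map]
      apply List.map_congr_left
      intro n _
      rw [Function.comp_apply, rowRec_ne hx]

-- ===== VERDICT (by name: the statement is the Claim_ definition above) =====
theorem mutate_measurement_basis_spec : Claim_equal_mutate_measurement_basis := by
  intro meas _
  unfold Spec_mutate_measurement_basis mutate_measurement_basis mutate_measurement_basis_alt
  by_cases h : meas.all (fun x => x != "I")
  · simp [h]
  · simp only [h, Bool.false_eq_true, ↓reduceIte, mutated_eq, product_eq]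
    have hidx : (natEnum meas 0).filterMap (fun p => if p.2 == "I" then some p.1 else none)
        = Ipos meas := by
      rw [idx_eq]; simp
    rw [hidx]
    rw [outer_foldl]
    simp only [List.nil_append, Ipos_length]
    apply List.map_congr_left
    intro n _
    have := inner_eq meas n
    rw [Ipos_length] at this
    exact this.symm
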